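-- pv_equiv track=rewrite | github.com/GauravMKedia/Data_Analysis | Extra_Work/solar_industry.py | merge_string
-- ===== SOURCE A (Python) =====
-- def merge_string(new_string1,new_string2):
--     dict1={}
--     dict2={}
--     for i in new_string1:
--         dict1[i] = dict1.get(i, 0) + 1
--     for i in new_string2:
--         dict2[i] = dict2.get(i,0) + 1;
--     merged_string = ""
--     for i in dict1:
--         merged_string += i
--     for i in dict2:
--         merged_string += i
--     return merged_string
-- ===== SOURCE B (Python) =====
-- def merge_string(new_string1, new_string2):
--     def dedup(s):
--         if s == "":
--             return ""
--         head = s[0]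
--         rest = "".join(ch for ch in s[1:] if ch != head)
--         return head + dedup(rest)
--     return dedup(new_string1) + dedup(new_string2)
-- ===== Notes on version B (the rewrite author's own statement) =====
-- stated objective: alternative
-- what changed: Replaces A's frequency-dict index tables (count every char, then emit the keys) by a divide-and-conquer recursion with no auxiliary index at all: keep the first character, delete every later occurrence of it from the remainder, and recurse on the shortened string; the two deduplicated strings are then concatenated.
import Mathlib
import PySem

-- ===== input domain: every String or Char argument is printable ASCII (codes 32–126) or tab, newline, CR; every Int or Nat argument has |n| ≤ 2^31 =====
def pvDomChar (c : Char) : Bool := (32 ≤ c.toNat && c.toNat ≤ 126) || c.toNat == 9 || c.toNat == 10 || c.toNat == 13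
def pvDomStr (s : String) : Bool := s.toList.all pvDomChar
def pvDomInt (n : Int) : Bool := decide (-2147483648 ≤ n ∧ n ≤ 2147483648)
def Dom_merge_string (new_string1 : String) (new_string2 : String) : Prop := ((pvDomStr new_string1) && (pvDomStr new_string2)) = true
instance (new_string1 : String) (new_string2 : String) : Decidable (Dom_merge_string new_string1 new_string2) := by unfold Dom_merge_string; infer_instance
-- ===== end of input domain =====

-- B replaces A's frequency-dict index tables by a recursion with no index: keep the head
-- character, delete its later occurrences, recurse on the rest (objective: alternative).


-- ===== PORT A =====
def merge_string (new_string1 : String) (new_string2 : String) : String :=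
  -- dict1[i] = dict1.get(i, 0) + 1  over new_string1
  let dict1 : PySem.Dict Char Int :=
    new_string1.toList.foldl (fun d i => d.insert i (d.getD i 0 + 1)) PySem.Dict.empty
  let dict2 : PySem.Dict Char Int :=
    new_string2.toList.foldl (fun d i => d.insert i (d.getD i 0 + 1)) PySem.Dict.empty
  -- merged_string = "" ; for i in dict1: merged_string += i ; for i in dict2: merged_string += i
  let merged1 : List Char := dict1.keys.foldl (fun m i => m ++ [i]) []
  let merged2 : List Char := dict2.keys.foldl (fun m i => m ++ [i]) merged1
  String.ofList merged2

-- ===== PORT B =====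
-- dedup(s): if s == "": return ""; rest = chars of s[1:] that differ from s[0]; s[0] + dedup(rest)
def pvDedupRec : List Char → List Char
  | [] => []
  | c :: cs => c :: pvDedupRec (cs.filter (fun ch => ch ≠ c))
termination_by l => l.length
decreasing_by
  rw [List.unattach_filter (g := fun x => decide (x ≠ c)) (hf := fun x h => rfl)]
  simp only [List.unattach_attach, List.length_cons]
  exact Nat.lt_succ_of_le (List.length_filter_le _ _)

def merge_string_alt (new_string1 : String) (new_string2 : String) : String :=
  String.ofList (pvDedupRec new_string1.toList ++ pvDedupRec new_string2.toList)

-- ===== PRECONDITION & SPEC =====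
def Spec_merge_string (new_string1 : String) (new_string2 : String) (out : String) : Prop := out = merge_string_alt new_string1 new_string2
instance (new_string1 : String) (new_string2 : String) (out : String) : Decidable (Spec_merge_string new_string1 new_string2 out) := by unfold Spec_merge_string; infer_instance

-- ===== CLAIM (what is proved, stated in full; the proofs are below) =====
def Claim_equal_merge_string : Prop := ∀ (new_string1 : String) (new_string2 : String), Dom_merge_string new_string1 new_string2 → Spec_merge_string new_string1 new_string2 (merge_string new_string1 new_string2)

-- ===== LEMMAS AND PROOFS =====

-- set(xs) commutes with filtering the raw list.
theorem pvOfList_filter (p : Char → Bool) (l : List Char) :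
    PySem.Set.ofList (l.filter p) = (PySem.Set.ofList l).filter p := by
  induction l with
  | nil => simp [PySem.Set.ofList_nil]
  | cons c cs ih =>
    by_cases hc : p c = true
    · rw [List.filter_cons_of_pos hc, PySem.Set.ofList_cons, PySem.Set.ofList_cons, ih,
        List.filter_cons_of_pos hc]
      simp [PySem.Set.discard, List.filter_filter, Bool.and_comm]
    · rw [List.filter_cons_of_neg (by simpa using hc), ih, PySem.Set.ofList_cons,
        List.filter_cons_of_neg (by simpa using hc)]
      simp only [PySem.Set.discard, List.filter_filter]
      exact List.filter_congr (fun x _ => by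
        by_cases hx : x = c
        · subst hx; simp [eq_false_of_ne_true hc]
        · simp [hx])

-- B's recursion computes exactly set(xs) (first occurrences in order).
theorem pvDedupRec_eq_ofList (l : List Char) : pvDedupRec l = PySem.Set.ofList l := by
  induction l using pvDedupRec.induct with
  | case1 => simp [pvDedupRec, PySem.Set.ofList_nil]
  | case2 c cs ih =>
    rw [List.unattach_filter (g := fun x => decide (x ≠ c)) (hf := fun x h => rfl), List.unattach_attach] at ih
    rw [pvDedupRec, ih, PySem.Set.ofList_cons, pvOfList_filter]
    simp only [PySem.Set.discard]
    exact congrArg (c :: ·) (List.filter_congr (fun x _ => by by_cases h : x = c <;> simp [h]))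

-- The counting loop of A leaves exactly set(xs) as its keys.
theorem pvKeys_count_loop (l : List Char) :
    (l.foldl (fun d i => d.insert i (d.getD i 0 + 1)) (PySem.Dict.empty : PySem.Dict Char Int)).keys
      = PySem.Set.ofList l := by
  rw [PySem.Dict.keys_foldl_insert]
  simp [PySem.Dict.keys_empty, PySem.Set.update_nil_left]

-- Appending chars one by one is list append.
theorem pvFoldl_append (l acc : List Char) :
    l.foldl (fun m i => m ++ [i]) acc = acc ++ l := by
  induction l generalizing acc with
  | nil => simp
  | cons x xs ih => simp [List.foldl_cons, ih]

-- ===== VERDICT (by name: the statement is the Claim_ definition above) =====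
theorem merge_string_spec : Claim_equal_merge_string := by
  intro s1 s2 _
  show _ = _
  unfold merge_string merge_string_alt
  simp only [pvKeys_count_loop, pvFoldl_append, pvDedupRec_eq_ofList, List.nil_append]
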